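-- pv_equiv track=rewrite | github.com/ibusnowden/munqib | munqib_dataprep/legacy.py | corpus_stats
-- ===== SOURCE A (Python) =====
-- from typing import Any, Dict, Iterable, Iterator, List, Optional, Tuple
--
-- def format_num(value: int) -> str:
--     return f"{value:,}"
--
-- def corpus_stats(docs: List[Dict[str, Any]], field: str = "text") -> str:
--     """Compute JSONL corpus statistics."""
--     lengths = [len(doc.get(field) or "") for doc in docs]
--
--     if not lengths:
--         return "docs: 0\nchars: 0\ntokens: ~0  (chars / 4)\nlengths: no docs found"
--
--     count = len(lengths)
--     total_chars = sum(lengths)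
--     tokens = total_chars // 4
--     sorted_lens = sorted(lengths)
--     p50 = sorted_lens[len(sorted_lens) // 2]
--     p90 = sorted_lens[len(sorted_lens) * 9 // 10]
--
--     return (
--         f"docs:    {format_num(count)}\n"
--         f"chars:   {format_num(total_chars)}\n"
--         f"tokens:  ~{format_num(tokens)}  (chars / 4)\n"
--         f"lengths: min={format_num(min(lengths))}  mean={format_num(total_chars // count)}"
--         f"  p50={format_num(p50)}  p90={format_num(p90)}  max={format_num(max(lengths))}\n"
--         f"format:  jsonl  field: {field}"
--     )
-- ===== SOURCE B (Python) =====
-- def format_num(value: int) -> str: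
--     return f"{value:,}"
--
--
-- def _select(xs, k):
--     """k-th smallest element of non-empty xs (0-based), by iterative 3-way quickselect."""
--     while True:
--         p = xs[len(xs) // 2]
--         lt = [x for x in xs if x < p]
--         if k < len(lt):
--             xs = lt
--             continue
--         eq = len([x for x in xs if x == p])
--         if k < len(lt) + eq:
--             return p
--         k -= len(lt) + eq
--         xs = [x for x in xs if x > p]
--
--
-- def corpus_stats(docs, field="text"):
--     """Compute JSONL corpus statistics."""
--     lengths = []
--     count = 0
--     total = 0
--     mn = None
--     mx = None
--     for doc in docs:
--         L = len(doc.get(field) or "")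
--         lengths.append(L)
--         count += 1
--         total += L
--         if mn is None or L < mn:
--             mn = L
--         if mx is None or L > mx:
--             mx = L
--
--     if count == 0:
--         return "docs: 0\nchars: 0\ntokens: ~0  (chars / 4)\nlengths: no docs found"
--
--     p50 = _select(lengths, count // 2)
--     p90 = _select(lengths, count * 9 // 10)
--
--     return (
--         f"docs:    {format_num(count)}\n"
--         f"chars:   {format_num(total)}\n"
--         f"tokens:  ~{format_num(total // 4)}  (chars / 4)\n"
--         f"lengths: min={format_num(mn)}  mean={format_num(total // count)}"
--         f"  p50={format_num(p50)}  p90={format_num(p90)}  max={format_num(mx)}\n"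
--         f"format:  jsonl  field: {field}"
--     )
-- ===== Notes on version B (the rewrite author's own statement) =====
-- stated objective: alternative
-- what changed: B computes count/total/min/max in the single pass that collects the lengths and finds p50/p90 by iterative 3-way quickselect (middle pivot) instead of fully sorting the length list.
import Mathlib
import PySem

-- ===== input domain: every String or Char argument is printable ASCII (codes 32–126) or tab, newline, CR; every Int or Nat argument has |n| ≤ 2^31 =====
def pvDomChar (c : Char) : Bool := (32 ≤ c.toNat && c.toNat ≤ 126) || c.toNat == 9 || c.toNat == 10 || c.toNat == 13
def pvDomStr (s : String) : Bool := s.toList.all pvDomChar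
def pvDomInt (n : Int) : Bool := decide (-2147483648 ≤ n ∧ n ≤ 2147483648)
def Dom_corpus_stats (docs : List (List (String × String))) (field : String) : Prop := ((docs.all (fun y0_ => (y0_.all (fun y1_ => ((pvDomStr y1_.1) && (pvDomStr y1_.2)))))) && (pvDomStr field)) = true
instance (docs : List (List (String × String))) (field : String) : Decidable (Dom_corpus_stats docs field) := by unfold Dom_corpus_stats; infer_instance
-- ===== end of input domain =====

-- B replaces A's full sort for the two percentiles by 3-way quickselect and computes
-- count/total/min/max in the single pass that collects the lengths (objective: alternative algorithm).

-- shared helper: f"{value:,}" — comma grouping; exact for the nonnegative values both programs format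
def pvGroup3 : List Char → List Char
  | a :: b :: c :: d :: rest => a :: b :: c :: ',' :: pvGroup3 (d :: rest)
  | l => l

def format_num (value : Int) : String :=
  String.ofList ((pvGroup3 (PySem.Int.toChars value).reverse).reverse)

-- ===== PORT A =====
-- len(doc.get(field) or "")  — `or` yields "" when the lookup is missing or the value is empty
def pvFieldLen (doc : List (String × String)) (field : String) : Int :=
  PySem.Str.len (match PySem.Dict.get? ⟨doc⟩ field with
                 | none => ""
                 | some s => if s == "" then "" else s)

def corpus_stats (docs : List (List (String × String))) (field : String) : String :=
  let lengths := docs.map (fun doc => pvFieldLen doc field)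
  if lengths == [] then
    "docs: 0\nchars: 0\ntokens: ~0  (chars / 4)\nlengths: no docs found"
  else
    let count : Int := (lengths.length : Int)
    let total_chars := lengths.sum
    let tokens := PySem.Int.floordiv total_chars 4
    let sorted_lens := PySem.List.sorted lengths (fun x => x) false
    -- sorted_lens[count//2], sorted_lens[count*9//10]: the indices are always in range, never an IndexError
    let p50 := PySem.List.pyGetD sorted_lens (PySem.Int.floordiv count 2) 0
    let p90 := PySem.List.pyGetD sorted_lens (PySem.Int.floordiv (count * 9) 10) 0
    "docs:    " ++ format_num count ++
    "\nchars:   " ++ format_num total_chars ++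
    "\ntokens:  ~" ++ format_num tokens ++ "  (chars / 4)" ++
    "\nlengths: min=" ++ format_num ((PySem.List.min? lengths (fun x => x)).getD 0) ++
    "  mean=" ++ format_num (PySem.Int.floordiv total_chars count) ++
    "  p50=" ++ format_num p50 ++
    "  p90=" ++ format_num p90 ++
    "  max=" ++ format_num ((PySem.List.max? lengths (fun x => x)).getD 0) ++
    "\nformat:  jsonl  field: " ++ field

-- ===== PORT B =====
-- _select: iterative 3-way quickselect, pivot = middle element; the [] case is unreachable
-- for the in-range k both call sites pass (Python would loop on xs[0] of a non-empty list)
-- termination helper for pvSelect: the pivot is an element of the list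
theorem pv_pivot_mem (a : Int) (t : List Int) :
    PySem.List.pyGetD (a :: t) (PySem.Int.floordiv ((a :: t).length : Int) 2) 0 ∈ a :: t := by
  rw [PySem.Int.floordiv_eq_ediv_of_pos (by omega),
      PySem.List.pyGetD_eq_getElem _ _ (by positivity) (by simp; omega)]
  exact List.getElem_mem _

def pvSelect : List Int → Int → Int
  | [], _ => 0
  | a :: t, k =>
    let p := PySem.List.pyGetD (a :: t) (PySem.Int.floordiv ((a :: t).length : Int) 2) 0
    let lt := (a :: t).filter (fun x => decide (x < p))
    if k < (lt.length : Int) then pvSelect lt k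
    else
      let eq := ((a :: t).filter (fun x => x == p)).length
      if k < (lt.length : Int) + (eq : Int) then p
      else pvSelect ((a :: t).filter (fun x => decide (p < x))) (k - (lt.length : Int) - (eq : Int))
  termination_by xs _ => xs.length
  decreasing_by
  · exact List.length_filter_lt_length_iff_exists.mpr ⟨p, pv_pivot_mem a t, by simp only [decide_eq_true_eq]; exact lt_irrefl _⟩
  · exact List.length_filter_lt_length_iff_exists.mpr ⟨p, pv_pivot_mem a t, by simp only [decide_eq_true_eq]; exact lt_irrefl _⟩

-- the single pass of B: state = (lengths, count, total, mn, mx)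
def pvStep (field : String) (st : List Int × Int × Int × Option Int × Option Int)
    (doc : List (String × String)) : List Int × Int × Int × Option Int × Option Int :=
  let L := pvFieldLen doc field
  (st.1 ++ [L], st.2.1 + 1, st.2.2.1 + L,
   (match st.2.2.2.1 with | none => some L | some m => if L < m then some L else some m),
   (match st.2.2.2.2 with | none => some L | some m => if m < L then some L else some m))

def corpus_stats_alt (docs : List (List (String × String))) (field : String) : String :=
  let st := docs.foldl (pvStep field) ([], 0, 0, none, none)
  if st.2.1 == 0 then
    "docs: 0\nchars: 0\ntokens: ~0  (chars / 4)\nlengths: no docs found"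
  else
    let p50 := pvSelect st.1 (PySem.Int.floordiv st.2.1 2)
    let p90 := pvSelect st.1 (PySem.Int.floordiv (st.2.1 * 9) 10)
    "docs:    " ++ format_num st.2.1 ++
    "\nchars:   " ++ format_num st.2.2.1 ++
    "\ntokens:  ~" ++ format_num (PySem.Int.floordiv st.2.2.1 4) ++ "  (chars / 4)" ++
    "\nlengths: min=" ++ format_num (st.2.2.2.1.getD 0) ++
    "  mean=" ++ format_num (PySem.Int.floordiv st.2.2.1 st.2.1) ++
    "  p50=" ++ format_num p50 ++
    "  p90=" ++ format_num p90 ++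
    "  max=" ++ format_num (st.2.2.2.2.getD 0) ++
    "\nformat:  jsonl  field: " ++ field

-- ===== PRECONDITION & SPEC =====
def Spec_corpus_stats (docs : List (List (String × String))) (field : String) (out : String) : Prop := out = corpus_stats_alt docs field
instance (docs : List (List (String × String))) (field : String) (out : String) : Decidable (Spec_corpus_stats docs field out) := by unfold Spec_corpus_stats; infer_instance

-- ===== CLAIM (what is proved, stated in full; the proofs are below) =====
def Claim_equal_corpus_stats : Prop := ∀ (docs : List (List (String × String))) (field : String), Dom_corpus_stats docs field → Spec_corpus_stats docs field (corpus_stats docs field)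

-- ===== LEMMAS AND PROOFS =====

theorem pv_partition_perm (xs : List Int) (p : Int) :
    (xs.filter (fun x => decide (x < p)) ++ List.replicate (xs.count p) p
      ++ xs.filter (fun x => decide (p < x))).Perm xs := by
  induction xs with
  | nil => simp
  | cons a t ih =>
    rcases lt_trichotomy a p with h | h | h
    · simpa [List.filter_cons, h, List.count_cons, ne_of_lt h, not_lt_of_gt h] using ih.cons a
    · subst h
      simp only [List.filter_cons, decide_eq_true_eq, lt_irrefl, if_false, List.count_cons_self,
        List.replicate_succ]
      refine List.Perm.trans ?_ (ih.cons a)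
      simp only [List.append_assoc]
      exact List.perm_middle
    · refine List.Perm.trans ?_ (ih.cons a)
      have hne : a ≠ p := Ne.symm (ne_of_lt h)
      simpa [List.filter_cons, not_lt_of_gt h, h, List.count_cons, hne, List.append_assoc] using
        (List.perm_middle (a := a)
          (l₁ := List.filter (fun x => decide (x < p)) t ++ List.replicate (t.count p) p)
          (l₂ := List.filter (fun x => decide (p < x)) t))

theorem pv_partition_length (xs : List Int) (p : Int) :
    (xs.filter (fun x => decide (x < p))).length + xs.count p
      + (xs.filter (fun x => decide (p < x))).length = xs.length := by
  have := (pv_partition_perm xs p).length_eq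
  simp only [List.length_append, List.length_replicate] at this
  omega

theorem pv_sorted_decomp (xs : List Int) (p : Int) :
    PySem.List.sorted xs (fun x => x) false =
      PySem.List.sorted (xs.filter (fun x => decide (x < p))) (fun x => x) false
        ++ List.replicate (xs.count p) p
        ++ PySem.List.sorted (xs.filter (fun x => decide (p < x))) (fun x => x) false := by
  apply PySem.List.sorted_id_eq_of_perm_of_pairwise
  · refine List.Perm.trans ?_ (pv_partition_perm xs p)
    exact ((PySem.List.sorted_perm _ _ _).append (List.Perm.refl _)).append
      (PySem.List.sorted_perm _ _ _)
  · have hL : ∀ y ∈ PySem.List.sorted (xs.filter (fun x => decide (x < p))) (fun x => x) false,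
        y < p := by
      intro y hy
      have := (PySem.List.mem_sorted _ _ _ _).mp hy
      simpa using (List.mem_filter.mp this).2
    have hG : ∀ y ∈ PySem.List.sorted (xs.filter (fun x => decide (p < x))) (fun x => x) false,
        p < y := by
      intro y hy
      have := (PySem.List.mem_sorted _ _ _ _).mp hy
      simpa using (List.mem_filter.mp this).2
    rw [List.pairwise_append]
    refine ⟨?_, ?_, ?_⟩
    · rw [List.pairwise_append]
      refine ⟨PySem.List.sorted_pairwise _ _, List.pairwise_replicate.mpr (Or.inr le_rfl), ?_⟩
      intro a ha b hb
      have := hL a ha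
      have := List.eq_of_mem_replicate hb
      omega
    · exact PySem.List.sorted_pairwise _ _
    · intro a ha b hb
      have hb' := hG b hb
      rcases List.mem_append.mp ha with h | h
      · have := hL a h; omega
      · have := List.eq_of_mem_replicate h; omega


theorem pv_select_eq (xs : List Int) (k : Int) (hk0 : 0 ≤ k) (hk : k < (xs.length : Int)) :
    pvSelect xs k = PySem.List.pyGetD (PySem.List.sorted xs (fun x => x) false) k 0 := by
  induction hn : xs.length using Nat.strong_induction_on generalizing xs k with
  | _ n ih =>
  subst hn
  match xs with
  | [] => simp at hk; omega
  | a :: t =>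
    rw [pvSelect]
    simp only []
    set p := PySem.List.pyGetD (a :: t) (PySem.Int.floordiv ((a :: t).length : Int) 2) 0 with hp
    set L := (a :: t).filter (fun x => decide (x < p)) with hLdef
    set G := (a :: t).filter (fun x => decide (p < x)) with hGdef
    have hE : ((a :: t).filter (fun x => x == p)).length = (a :: t).count p := by
      simp [List.count_eq_length_filter]
    have hlen := pv_partition_length (a :: t) p
    have hsd := pv_sorted_decomp (a :: t) p
    rw [← hLdef, ← hGdef] at hsd
    rw [← hLdef, ← hGdef] at hlen
    have hLlt : L.length < (a :: t).length := by
      rw [hLdef]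
      exact List.length_filter_lt_length_iff_exists.mpr
        ⟨p, pv_pivot_mem a t, by simp only [decide_eq_true_eq]; exact lt_irrefl _⟩
    have hGlt : G.length < (a :: t).length := by
      rw [hGdef]
      exact List.length_filter_lt_length_iff_exists.mpr
        ⟨p, pv_pivot_mem a t, by simp only [decide_eq_true_eq]; exact lt_irrefl _⟩
    rw [hE, hsd]
    have hAlen : (PySem.List.sorted L (fun x => x) false).length = L.length :=
      PySem.List.length_sorted _ _ _
    have hGslen : (PySem.List.sorted G (fun x => x) false).length = G.length :=
      PySem.List.length_sorted _ _ _
    have hAlen' : (PySem.List.sorted L (fun x => x)).length = L.length :=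
      PySem.List.length_sorted _ _ _
    have hGslen' : (PySem.List.sorted G (fun x => x)).length = G.length :=
      PySem.List.length_sorted _ _ _
    split_ifs with h1 h2
    · -- k in the < p block
      have IH := ih L.length hLlt L k hk0 (by exact_mod_cast h1) rfl
      rw [IH, PySem.List.pyGetD_of_nonneg _ _ hk0, PySem.List.pyGetD_of_nonneg _ _ hk0]
      rw [List.getD_append _ _ _ _ (by rw [List.length_append, hAlen']; omega),
          List.getD_append _ _ _ _ (by rw [hAlen']; omega)]
    · -- k in the pivot block
      rw [PySem.List.pyGetD_of_nonneg _ _ hk0]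
      rw [List.getD_append _ _ _ _ (by rw [List.length_append, hAlen']; simp; omega),
          List.getD_append_right _ _ _ _ (by rw [hAlen']; omega),
          List.getD_replicate _ (by rw [hAlen']; omega)]
    · -- k in the > p block
      have hk0' : 0 ≤ k - (L.length : Int) - ((a :: t).count p : Int) := by omega
      have hklt : k - (L.length : Int) - ((a :: t).count p : Int) < (G.length : Int) := by
        have hkk : k < ((a :: t).length : Int) := hk
        omega
      have IH := ih G.length hGlt G _ hk0' hklt rfl
      rw [IH, PySem.List.pyGetD_of_nonneg _ _ hk0, PySem.List.pyGetD_of_nonneg _ _ hk0']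
      rw [List.getD_append_right _ _ _ _ (by rw [List.length_append, hAlen']; simp; omega)]
      congr 1
      rw [List.length_append, hAlen']
      simp
      omega

-- the option-valued running minimum of B is foldl min
theorem pv_optmin (t : List Int) (m : Int) :
    t.foldl (fun o L => match o with | none => some L | some mm => if L < mm then some L else some mm)
      (some m) = some (t.foldl min m) := by
  induction t generalizing m with
  | nil => rfl
  | cons x t ih =>
    show List.foldl _ (if x < m then some x else some m) t = some (List.foldl min (min m x) t)
    rcases lt_or_ge x m with h | h
    · rw [if_pos h, ih, show min m x = x by omega]
    · rw [if_neg (by omega), ih, show min m x = m by omega]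

-- the option-valued running maximum of B is foldl max
theorem pv_optmax (t : List Int) (m : Int) :
    t.foldl (fun o L => match o with | none => some L | some mm => if mm < L then some L else some mm)
      (some m) = some (t.foldl max m) := by
  induction t generalizing m with
  | nil => rfl
  | cons x t ih =>
    show List.foldl _ (if m < x then some x else some m) t = some (List.foldl max (max m x) t)
    rcases lt_or_ge m x with h | h
    · rw [if_pos h, ih, show max m x = x by omega]
    · rw [if_neg (by omega), ih, show max m x = m by omega]

-- the single pass of B, as a function of an arbitrary starting state
theorem pv_fold_inv (docs : List (List (String × String))) (field : String)
    (acc : List Int) (c t : Int) (mn mx : Option Int) :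
    docs.foldl (pvStep field) (acc, c, t, mn, mx) =
      (acc ++ docs.map (fun d => pvFieldLen d field),
       c + (docs.length : Int),
       t + (docs.map (fun d => pvFieldLen d field)).sum,
       (docs.map (fun d => pvFieldLen d field)).foldl
         (fun o L => match o with | none => some L | some m => if L < m then some L else some m) mn,
       (docs.map (fun d => pvFieldLen d field)).foldl
         (fun o L => match o with | none => some L | some m => if m < L then some L else some m) mx) := by
  induction docs generalizing acc c t mn mx with
  | nil => simp
  | cons d ds ih =>
    simp only [List.foldl_cons, List.map_cons, List.length_cons, List.sum_cons, pvStep]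
    rw [ih]
    simp only [Prod.mk.injEq]
    exact ⟨by simp, by push_cast; ring, by ring, trivial⟩

-- ===== VERDICT (by name: the statement is the Claim_ definition above) =====
theorem corpus_stats_spec : Claim_equal_corpus_stats := by
  intro docs field _
  unfold Spec_corpus_stats corpus_stats corpus_stats_alt
  rw [pv_fold_inv]
  cases docs with
  | nil => simp
  | cons d ds =>
    simp only [List.map_cons, List.length_cons, List.nil_append, zero_add, List.sum_cons,
      List.length_map]
    rw [if_neg (by simp), if_neg (by simp; omega)]
    generalize pvFieldLen d field = x
    generalize hm : List.map (fun doc => pvFieldLen doc field) ds = tl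
    have hlen : tl.length = ds.length := by rw [← hm, List.length_map]
    rw [PySem.Int.floordiv_eq_ediv_of_pos (show (0:Int) < 2 by omega),
        PySem.Int.floordiv_eq_ediv_of_pos (show (0:Int) < 10 by omega)]
    have e50 := pv_select_eq (x :: tl) (((ds.length + 1 : Nat) : Int) / 2)
      (by positivity) (by simp [hlen]; omega)
    have e90 := pv_select_eq (x :: tl) ((((ds.length + 1 : Nat) : Int) * 9) / 10)
      (by positivity) (by simp [hlen]; omega)
    rw [e50, e90]
    have hmin : (List.foldl (fun o L => match o with
          | none => some L
          | some m => if L < m then some L else some m) none (x :: tl)).getD 0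
        = (PySem.List.min? (x :: tl) (fun y => y)).getD 0 := by
      rw [PySem.List.min?_id_cons,
          show (List.foldl (fun o L => match o with
            | none => some L
            | some m => if L < m then some L else some m) none (x :: tl))
            = some (tl.foldl min x) from pv_optmin tl x]
    have hmax : (List.foldl (fun o L => match o with
          | none => some L
          | some m => if m < L then some L else some m) none (x :: tl)).getD 0
        = (PySem.List.max? (x :: tl) (fun y => y)).getD 0 := by
      rw [PySem.List.max?_id_cons,
          show (List.foldl (fun o L => match o with
            | none => some L
            | some m => if m < L then some L else some m) none (x :: tl))
            = some (tl.foldl max x) from pv_optmax tl x]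
    rw [hmin, hmax]
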